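-- pv_equiv track=rewrite | github.com/fernandoMackenzie/Trabalhos-Mackenzie | 2º Semestre/Exercícios de classe/Exercício 5.py | intersec
-- ===== SOURCE A (Python) =====
-- def intersec(a,b):
--     lista = ""
--     for x in range(len(a)):
--         if a[x] not in b:
--             lista = lista+" "+str(a[x])
--     for x in range(len(b)):
--         if b[x] not in a:
--             lista = lista+" "+str(b[x])
--     for x in range(len(a)):
--         if a[x] in b:
--             lista = lista+" "+str(a[x])
--     return lista
-- ===== SOURCE B (Python) =====
-- def intersec(a, b):
--     sa, sb = set(a), set(b)
--     tagged = [(2 if x in sb else 0, " " + str(x)) for x in a]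
--     tagged += [(1, " " + str(x)) for x in b if x not in sa]
--     tagged.sort(key=lambda t: t[0])
--     return "".join(s for _, s in tagged)
-- ===== Notes on version B (the rewrite author's own statement) =====
-- stated objective: faster
-- what changed: B replaces A's three list-membership scan passes and quadratic string concatenation with hash-set membership plus a decorate/stable-sort/join pipeline: each piece ' '+str(x) is tagged 0 (a-only), 1 (b-only) or 2 (common), the tagged pieces are stable-sorted by tag and joined, so the grouping A achieves by re-scanning is achieved by the stable sort.
import Mathlib
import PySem

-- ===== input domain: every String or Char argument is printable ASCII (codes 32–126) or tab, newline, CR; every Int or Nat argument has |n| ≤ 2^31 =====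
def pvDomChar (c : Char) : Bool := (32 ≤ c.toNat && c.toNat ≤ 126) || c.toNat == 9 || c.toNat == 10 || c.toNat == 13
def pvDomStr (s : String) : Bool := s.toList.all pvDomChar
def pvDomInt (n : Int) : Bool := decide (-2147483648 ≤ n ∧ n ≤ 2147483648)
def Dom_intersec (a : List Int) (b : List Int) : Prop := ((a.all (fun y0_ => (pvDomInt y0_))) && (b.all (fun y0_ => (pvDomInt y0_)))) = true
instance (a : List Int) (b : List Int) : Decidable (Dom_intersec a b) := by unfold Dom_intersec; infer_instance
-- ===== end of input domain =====

-- B replaces A's three list-membership scan passes and repeated string concatenation with hash-set membership plus a tag-decorate / stable-sort-by-tag / join pipeline; measured faster in a timing run, same output.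


-- ===== PORT A =====
-- literal transliteration: three index loops 'for x in range(len(·))', one string accumulator
def intersec (a : List Int) (b : List Int) : String :=
  let lista : String := ""
  let lista := (PySem.List.pyRange 0 (a.length : Int) 1).foldl
    (fun lista x => if PySem.List.pyGetD a x 0 ∉ b
      then lista ++ " " ++ PySem.Int.toStr (PySem.List.pyGetD a x 0) else lista) lista
  let lista := (PySem.List.pyRange 0 (b.length : Int) 1).foldl
    (fun lista x => if PySem.List.pyGetD b x 0 ∉ a
      then lista ++ " " ++ PySem.Int.toStr (PySem.List.pyGetD b x 0) else lista) lista
  let lista := (PySem.List.pyRange 0 (a.length : Int) 1).foldl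
    (fun lista x => if PySem.List.pyGetD a x 0 ∈ b
      then lista ++ " " ++ PySem.Int.toStr (PySem.List.pyGetD a x 0) else lista) lista
  lista

-- ===== PORT B =====
-- literal transliteration of Source B: build sets of a and b, tag every piece (0 = a-only, 1 = b-only, 2 = common),
-- stable-sort the tagged pieces by tag, join the pieces
def intersec_alt (a : List Int) (b : List Int) : String :=
  let sa := PySem.Set.ofList a
  let sb := PySem.Set.ofList b
  let tagged : List (Int × String) :=
    a.map (fun x => ((if x ∈ sb then (2 : Int) else 0), " " ++ PySem.Int.toStr x))
  let tagged := tagged ++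
    (b.filter (fun x => decide (x ∉ sa))).map (fun x => ((1 : Int), " " ++ PySem.Int.toStr x))
  let tagged := PySem.List.sorted tagged (fun t => t.1) false
  PySem.Str.join "" (tagged.map (fun t => t.2))

-- ===== PRECONDITION & SPEC =====
def Spec_intersec (a : List Int) (b : List Int) (out : String) : Prop := out = intersec_alt a b
instance (a : List Int) (b : List Int) (out : String) : Decidable (Spec_intersec a b out) := by unfold Spec_intersec; infer_instance

-- ===== CLAIM (what is proved, stated in full; the proofs are below) =====
def Claim_equal_intersec : Prop := ∀ (a : List Int) (b : List Int), Dom_intersec a b → Spec_intersec a b (intersec a b)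

-- ===== LEMMAS AND PROOFS =====

-- the word-concatenating fold, the common normal form of both sides
def pvWords (l : List Int) : String :=
  l.foldl (fun acc x => acc ++ " " ++ PySem.Int.toStr x) ""

-- append-only string fold: the start accumulator factors out in front
theorem pvWords_shift : ∀ (l : List Int) (s : String),
    l.foldl (fun acc x => acc ++ " " ++ PySem.Int.toStr x) s = s ++ pvWords l := by
  intro l
  induction l with
  | nil => intro s; simp [pvWords]
  | cons h t ih =>
    intro s
    simp only [List.foldl_cons, pvWords]
    rw [ih (s ++ " " ++ PySem.Int.toStr h), ih ("" ++ " " ++ PySem.Int.toStr h)]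
    simp [String.append_assoc]

theorem pvWords_cons (h : Int) (l : List Int) :
    pvWords (h :: l) = " " ++ PySem.Int.toStr h ++ pvWords l := by
  rw [pvWords, List.foldl_cons, pvWords_shift]; simp

-- a guarded word fold from any start is the start followed by the filtered word list
theorem pvGuard (c : Int → Prop) [DecidablePred c] : ∀ (l : List Int) (s : String),
    l.foldl (fun acc x => if c x then acc ++ " " ++ PySem.Int.toStr x else acc) s
      = s ++ pvWords (l.filter (fun x => decide (c x))) := by
  intro l
  induction l with
  | nil => intro s; simp [pvWords]
  | cons h t ih =>
    intro s
    by_cases hc : c h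
    · simp only [List.foldl_cons, if_pos hc, List.filter_cons, decide_eq_true hc, ite_true]
      rw [ih, pvWords_cons]
      simp [pvWords, String.append_assoc]
    · simp only [List.foldl_cons, if_neg hc, List.filter_cons]
      rw [ih]
      simp [hc]

-- joining with "" is concatenation, piece by piece
theorem pvJoin_cons (s : String) (l : List String) :
    PySem.Str.join "" (s :: l) = s ++ PySem.Str.join "" l := by
  cases l <;> simp [PySem.Str.join, PySem.Chars.join, List.intercalate, String.ofList_append]

theorem pvJoin_append : ∀ (p q : List String),
    PySem.Str.join "" (p ++ q) = PySem.Str.join "" p ++ PySem.Str.join "" q := by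
  intro p q
  induction p with
  | nil => simp [PySem.Str.join, PySem.Chars.join, List.intercalate]
  | cons h t ih => rw [List.cons_append, pvJoin_cons, pvJoin_cons, ih, String.append_assoc]

theorem pvJoin_map_words : ∀ (l : List Int),
    PySem.Str.join "" (l.map (fun x => " " ++ PySem.Int.toStr x)) = pvWords l := by
  intro l
  induction l with
  | nil => rfl
  | cons h t ih =>
    rw [List.map_cons, pvJoin_cons, ih, pvWords_cons]

-- stable insertion lands exactly between the ≤-keys and the >-keys
theorem pvInsertBy_between (x : Int × String) :
    ∀ (p q : List (Int × String)),
      (∀ y ∈ p, ¬ x.1 < y.1) → (∀ y ∈ q, x.1 < y.1) →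
      PySem.List.insertBy (fun a b => decide (a.1 < b.1)) x (p ++ q) = p ++ x :: q := by
  intro p
  induction p with
  | nil =>
    intro q _ hq
    cases q with
    | nil => simp [PySem.List.insertBy]
    | cons y ys => simp [PySem.List.insertBy, hq y (by simp)]
  | cons h t ih =>
    intro q hp hq
    simp only [List.cons_append, PySem.List.insertBy, decide_eq_true_eq,
      if_neg (hp h (by simp))]
    rw [ih q (fun y hy => hp y (by simp [hy])) hq]

-- the insertion-sort fold keeps the three tag groups contiguous, in first-seen order
theorem pvFoldl_insert_grouped :
    ∀ (l g0 g1 g2 : List (Int × String)),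
      (∀ p ∈ l, p.1 = 0 ∨ p.1 = 1 ∨ p.1 = 2) →
      (∀ p ∈ g0, p.1 = 0) → (∀ p ∈ g1, p.1 = 1) → (∀ p ∈ g2, p.1 = 2) →
      l.foldl (fun acc x => PySem.List.insertBy (fun a b => decide (a.1 < b.1)) x acc)
          (g0 ++ g1 ++ g2)
        = (g0 ++ l.filter (fun p => p.1 == 0)) ++ (g1 ++ l.filter (fun p => p.1 == 1))
            ++ (g2 ++ l.filter (fun p => p.1 == 2)) := by
  intro l
  induction l with
  | nil => intro g0 g1 g2 _ _ _ _; simp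
  | cons x t ih =>
    intro g0 g1 g2 hl h0 h1 h2
    have hx := hl x (by simp)
    simp only [List.foldl]
    rcases hx with hx | hx | hx
    · rw [List.append_assoc g0 g1 g2,
        pvInsertBy_between x g0 (g1 ++ g2)
          (fun y hy => by rw [hx, h0 y hy]; omega)
          (fun y hy => by rcases List.mem_append.1 hy with h | h
                          · rw [hx, h1 y h]; omega
                          · rw [hx, h2 y h]; omega),
        show g0 ++ x :: (g1 ++ g2) = (g0 ++ [x]) ++ g1 ++ g2 by simp,
        ih (g0 ++ [x]) g1 g2 (fun p hp => hl p (by simp [hp]))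
          (fun p hp => by rcases List.mem_append.1 hp with h | h
                          · exact h0 p h
                          · simp at h; rw [h, hx]) h1 h2]
      simp [hx]
    · rw [show g0 ++ g1 ++ g2 = (g0 ++ g1) ++ g2 by simp,
        pvInsertBy_between x (g0 ++ g1) g2
          (fun y hy => by rcases List.mem_append.1 hy with h | h
                          · rw [hx, h0 y h]; omega
                          · rw [hx, h1 y h]; omega)
          (fun y hy => by rw [hx, h2 y hy]; omega),
        show (g0 ++ g1) ++ x :: g2 = g0 ++ (g1 ++ [x]) ++ g2 by simp,
        ih g0 (g1 ++ [x]) g2 (fun p hp => hl p (by simp [hp])) h0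
          (fun p hp => by rcases List.mem_append.1 hp with h | h
                          · exact h1 p h
                          · simp at h; rw [h, hx]) h2]
      simp [hx]
    · rw [show g0 ++ g1 ++ g2 = (g0 ++ g1 ++ g2) ++ [] by simp,
        pvInsertBy_between x (g0 ++ g1 ++ g2) []
          (fun y hy => by rcases List.mem_append.1 hy with h | h
                          · rcases List.mem_append.1 h with h' | h'
                            · rw [hx, h0 y h']; omega
                            · rw [hx, h1 y h']; omega
                          · rw [hx, h2 y h]; omega)
          (by simp),
        show (g0 ++ g1 ++ g2) ++ x :: [] = g0 ++ g1 ++ (g2 ++ [x]) by simp,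
        ih g0 g1 (g2 ++ [x]) (fun p hp => hl p (by simp [hp])) h0 h1
          (fun p hp => by rcases List.mem_append.1 hp with h | h
                          · exact h2 p h
                          · simp at h; rw [h, hx])]
      simp [hx]

-- ===== VERDICT (by name: the statement is the Claim_ definition above) =====
theorem intersec_spec : Claim_equal_intersec := by
  intro a b _
  show intersec a b = intersec_alt a b
  unfold intersec intersec_alt
  dsimp only
  rw [PySem.List.foldl_pyRange_zero_pyGetD' a 0
        (fun lista v => if v ∉ b then lista ++ " " ++ PySem.Int.toStr v else lista),
      PySem.List.foldl_pyRange_zero_pyGetD' b 0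
        (fun lista v => if v ∉ a then lista ++ " " ++ PySem.Int.toStr v else lista),
      PySem.List.foldl_pyRange_zero_pyGetD' a 0
        (fun lista v => if v ∈ b then lista ++ " " ++ PySem.Int.toStr v else lista)]
  -- A side: normalise the three chained folds to pvWords of three filtered lists
  rw [pvGuard (fun x => x ∉ b) a "",
      pvGuard (fun x => x ∉ a) b _,
      pvGuard (fun x => x ∈ b) a _]
  -- B side: name the tagged list and resolve the stable sort into the three tag groups
  rw [PySem.List.sorted_eq_foldl_insertBy]
  rw [show (a.map (fun x => ((if x ∈ PySem.Set.ofList b then (2 : Int) else 0), " " ++ PySem.Int.toStr x)) ++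
        (b.filter (fun x => decide (x ∉ PySem.Set.ofList a))).map
          (fun x => ((1 : Int), " " ++ PySem.Int.toStr x))).foldl
        (fun acc x => PySem.List.insertBy (fun p q => decide (p.1 < q.1)) x acc) []
      = _ from pvFoldl_insert_grouped _ [] [] []
        (by intro p hp
            rcases List.mem_append.1 hp with h | h
            · rcases List.mem_map.1 h with ⟨x, _, rfl⟩
              by_cases hx : x ∈ PySem.Set.ofList b <;> simp [hx]
            · rcases List.mem_map.1 h with ⟨x, _, rfl⟩
              simp)
        (by simp) (by simp) (by simp)]
  have hb0 : ∀ x : Int, (((if x ∈ PySem.Set.ofList b then (2 : Int) else 0), " " ++ PySem.Int.toStr x).1 == 0) = decide (x ∉ b) := by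
    intro x; by_cases h : x ∈ b <;> simp [PySem.Set.mem_ofList, h]
  have hb2 : ∀ x : Int, (((if x ∈ PySem.Set.ofList b then (2 : Int) else 0), " " ++ PySem.Int.toStr x).1 == 2) = decide (x ∈ b) := by
    intro x; by_cases h : x ∈ b <;> simp [PySem.Set.mem_ofList, h]
  simp only [List.nil_append, List.filter_append, List.filter_map, List.map_append,
    List.map_map, Function.comp_def, hb0, hb2]
  simp [pvJoin_append, pvJoin_map_words, PySem.Set.mem_ofList]
  simp [show ∀ x : Int, ((if x ∈ b then (2 : Int) else 0) == 1) = false from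
          fun x => by by_cases h : x ∈ b <;> simp [h],
        pvWords, String.append_assoc]
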